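-- pv_equiv track=rewrite | github.com/jonathanyulan99/SDE-Fundamentals | ALL/Educative/Recursion/recursion_subset_string_subsequence.py | skip_embedded_string_2
-- ===== SOURCE A (Python) =====
-- def skip_embedded_string_2(string, skip, start_index=0):
--     if start_index >= len(string):
--         return ''
--
--     skip_length = len(skip)
--     substring_length = len(string) - start_index
--
--     if substring_length == 0:
--         return ''
--
--     if substring_length < skip_length:
--         subsequence = ''
--         for i in range(start_index, len(string)):
--             subsequence += string[i]
--         return subsequence
--
--     for i in range(skip_length):
--         if string[start_index + i] != skip[i]:
--             if i == 0:
--                 return string[start_index] + skip_embedded_string_2(string, skip, start_index + 1)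
--             else:
--                 return string[start_index] + skip_embedded_string_2(string, skip, start_index + i)
--
--     return skip_embedded_string_2(string, skip, start_index + skip_length)
-- ===== SOURCE B (Python) =====
-- def skip_embedded_string_2(string, skip, start_index=0):
--     # Iterative single pass with a cursor and an output accumulator (joined once).
--     n, k = len(string), len(skip)
--     out = []
--     p = start_index
--     while p < n:
--         if n - p < k:
--             out.append(string[p])
--             p += 1
--         else:
--             m = 0
--             while m < k and string[p + m] == skip[m]:
--                 m += 1
--             if m == k:
--                 p += k
--             else:
--                 out.append(string[p])
--                 p += max(m, 1)
--     return ''.join(out)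
-- ===== Notes on version B (the rewrite author's own statement) =====
-- stated objective: alternative
-- what changed: Replaced A's tail recursion (with a char-by-char copy loop and per-call string concatenation) by a single iterative while-loop with a cursor and a list accumulator joined once at the end; the mismatch scan computes a matched-prefix length m and advances by max(m,1) or k.
import Mathlib
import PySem

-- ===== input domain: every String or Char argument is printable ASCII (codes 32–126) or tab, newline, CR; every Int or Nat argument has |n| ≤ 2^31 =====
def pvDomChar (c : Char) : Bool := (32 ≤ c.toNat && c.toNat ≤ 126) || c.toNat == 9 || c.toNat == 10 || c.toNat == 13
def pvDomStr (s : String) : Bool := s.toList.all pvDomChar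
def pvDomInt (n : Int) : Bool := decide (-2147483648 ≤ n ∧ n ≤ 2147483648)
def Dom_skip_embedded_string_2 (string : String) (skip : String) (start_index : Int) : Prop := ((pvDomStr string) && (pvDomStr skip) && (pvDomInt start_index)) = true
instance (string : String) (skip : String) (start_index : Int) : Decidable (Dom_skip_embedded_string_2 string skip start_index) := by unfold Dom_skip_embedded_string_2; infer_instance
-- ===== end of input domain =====

-- B replaces A's recursion by one iterative cursor loop with an accumulator joined once (same return value on Pre_).

-- ===== PORT A =====
-- string[i] as a one-character piece; none (= Python IndexError) yields [] — unreachable inside Pre_.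
def pvChar (cs : List Char) (i : Int) : List Char :=
  match PySem.List.pyGet? cs i with
  | some c => [c]
  | none => []

-- the loop `for i in range(skip_length): if string[start_index+i] != skip[i]: return …` : first mismatch index, none if all match
def pvA_mismatch (cs ks : List Char) (start_index : Int) (i : Nat) : Option Nat :=
  if i < ks.length then
    if PySem.List.pyGet? cs (start_index + (i : Int)) ≠ PySem.List.pyGet? ks (i : Int) then some i
    else pvA_mismatch cs ks start_index (i + 1)
  else none
termination_by ks.length - i

-- A's recursion, with a fuel (recursion-depth) guard; fuel never runs out inside Pre_.
def pvA_go (cs ks : List Char) (start_index : Int) : Nat → List Char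
  | 0 => []
  | fuel + 1 =>
    if (cs.length : Int) ≤ start_index then []
    else
      let skip_length : Int := (ks.length : Int)
      let substring_length : Int := (cs.length : Int) - start_index
      if substring_length = 0 then []
      else if substring_length < skip_length then
        (PySem.List.pyRange start_index (cs.length : Int) 1).foldl (fun acc i => acc ++ pvChar cs i) []
      else
        match pvA_mismatch cs ks start_index 0 with
        | some i =>
          if i = 0 then pvChar cs start_index ++ pvA_go cs ks (start_index + 1) fuel
          else pvChar cs start_index ++ pvA_go cs ks (start_index + (i : Int)) fuel
        | none => pvA_go cs ks (start_index + skip_length) fuel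

def skip_embedded_string_2 (string : String) (skip : String) (start_index : Int) : String :=
  String.ofList (pvA_go string.toList skip.toList start_index
    (((string.toList.length : Int) - start_index).toNat + 1))

-- ===== PORT B =====
-- the inner `while m < k and string[p+m] == skip[m]: m += 1` : matched-prefix length from m
def pvB_match (cs ks : List Char) (p : Int) (m : Nat) : Nat :=
  if m < ks.length then
    if PySem.List.pyGet? cs (p + (m : Int)) = PySem.List.pyGet? ks (m : Int) then pvB_match cs ks p (m + 1)
    else m
  else m
termination_by ks.length - m

-- the outer while-loop with cursor p and accumulator out; fuel bounds the iteration count (enough inside Pre_).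
def pvB_loop (cs ks : List Char) : Int → List Char → Nat → List Char
  | _, out, 0 => out
  | p, out, fuel + 1 =>
    if p < (cs.length : Int) then
      if (cs.length : Int) - p < (ks.length : Int) then
        pvB_loop cs ks (p + 1) (out ++ pvChar cs p) fuel
      else
        let m := pvB_match cs ks p 0
        if m = ks.length then pvB_loop cs ks (p + (ks.length : Int)) out fuel
        else pvB_loop cs ks (p + (max m 1 : Nat)) (out ++ pvChar cs p) fuel
    else out

def skip_embedded_string_2_alt (string : String) (skip : String) (start_index : Int) : String :=
  String.ofList (pvB_loop string.toList skip.toList start_index []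
    ((string.toList.length : Int) - start_index).toNat)

-- ===== PRECONDITION & SPEC =====
-- Pre_ excludes exactly the inputs where A raises: skip = "" with start_index < len(string)
-- (RecursionError; B loops forever there), and start_index < -len(string) (IndexError from
-- Python's negative indexing; B raises the same). On every other input A returns normally.
def Pre_skip_embedded_string_2 (string : String) (skip : String) (start_index : Int) : Prop :=
  (string.toList.length : Int) ≤ start_index ∨
    (skip ≠ "" ∧ -(string.toList.length : Int) ≤ start_index)
instance (string : String) (skip : String) (start_index : Int) : Decidable (Pre_skip_embedded_string_2 string skip start_index) := by unfold Pre_skip_embedded_string_2; infer_instance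

def pvWitness_skip_embedded_string_2 : String × String × Int := ("abcabcx", "bc", 0)

def Spec_skip_embedded_string_2 (string : String) (skip : String) (start_index : Int) (out : String) : Prop := out = skip_embedded_string_2_alt string skip start_index
instance (string : String) (skip : String) (start_index : Int) (out : String) : Decidable (Spec_skip_embedded_string_2 string skip start_index out) := by unfold Spec_skip_embedded_string_2; infer_instance

-- ===== CLAIM (what is proved, stated in full; the proofs are below) =====
def Claim_equal_skip_embedded_string_2 : Prop := ∀ (string : String) (skip : String) (start_index : Int), Dom_skip_embedded_string_2 string skip start_index → Pre_skip_embedded_string_2 string skip start_index → Spec_skip_embedded_string_2 string skip start_index (skip_embedded_string_2 string skip start_index)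

-- ===== LEMMAS AND PROOFS =====

lemma pvA_mismatch_lt (cs ks : List Char) (p : Int) :
    ∀ i j, pvA_mismatch cs ks p i = some j → j < ks.length ∧ i ≤ j := by
  intro i
  induction i using pvA_mismatch.induct cs ks p with
  | case1 i hi hne =>
    intro j h; rw [pvA_mismatch, if_pos hi, if_pos hne] at h
    obtain rfl := Option.some.inj h; exact ⟨hi, le_rfl⟩
  | case2 i hi hne ih =>
    intro j h; rw [pvA_mismatch, if_pos hi, if_neg hne] at h
    obtain ⟨h1, h2⟩ := ih j h; exact ⟨h1, by omega⟩
  | case3 i hi =>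
    intro j h; rw [pvA_mismatch, if_neg hi] at h; exact absurd h (by simp)

lemma pvMatch_eq (cs ks : List Char) (p : Int) :
    ∀ i, i ≤ ks.length → pvB_match cs ks p i = (pvA_mismatch cs ks p i).getD ks.length := by
  intro i
  induction i using pvB_match.induct cs ks p with
  | case1 i hi heq ih =>
    intro _
    rw [pvB_match, if_pos hi, if_pos heq, pvA_mismatch, if_pos hi, if_neg (by simpa using heq)]
    exact ih (by omega)
  | case2 i hi hne =>
    intro _
    rw [pvB_match, if_pos hi, if_neg hne, pvA_mismatch, if_pos hi, if_pos (by simpa using hne)]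
    rfl
  | case3 i hi =>
    intro hle
    rw [pvB_match, if_neg hi, pvA_mismatch, if_neg hi]
    simpa using by omega

lemma foldl_app_acc (cs : List Char) :
    ∀ (l : List Int) (acc : List Char),
      l.foldl (fun a i => a ++ pvChar cs i) acc = acc ++ l.foldl (fun a i => a ++ pvChar cs i) [] := by
  intro l
  induction l with
  | nil => simp
  | cons x xs ih =>
    intro acc
    simp only [List.foldl_cons]
    rw [ih (acc ++ pvChar cs x), ih ([] ++ pvChar cs x)]
    simp [List.append_assoc]

lemma pvB_tail (cs ks : List Char) :
    ∀ (fB : Nat) (p : Int) (out : List Char),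
      ((cs.length : Int) - p).toNat ≤ fB → (cs.length : Int) - p < (ks.length : Int) →
      pvB_loop cs ks p out fB =
        out ++ (PySem.List.pyRange p (cs.length : Int) 1).foldl (fun acc i => acc ++ pvChar cs i) [] := by
  intro fB
  induction fB with
  | zero =>
    intro p out hf hk
    have hple : (cs.length : Int) ≤ p := by omega
    rw [PySem.List.pyRange_one_eq_nil hple]
    simp [pvB_loop]
  | succ f ih =>
    intro p out hf hk
    by_cases hp : p < (cs.length : Int)
    · rw [pvB_loop, if_pos hp, if_pos hk,
        ih (p + 1) (out ++ pvChar cs p) (by omega) (by omega),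
        PySem.List.pyRange_one_cons hp]
      simp only [List.foldl_cons, List.nil_append]
      rw [foldl_app_acc cs _ (pvChar cs p), List.append_assoc]
    · rw [pvB_loop, if_neg hp, PySem.List.pyRange_one_eq_nil (by omega)]
      simp

lemma pvMain (cs ks : List Char) :
    ∀ (fA : Nat) (p : Int) (out : List Char) (fB : Nat),
      (ks ≠ [] ∨ (cs.length : Int) ≤ p) →
      ((cs.length : Int) - p).toNat < fA → ((cs.length : Int) - p).toNat ≤ fB →
      pvB_loop cs ks p out fB = out ++ pvA_go cs ks p fA := by
  intro fA
  induction fA with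
  | zero => intro p out fB _ hfa _; omega
  | succ f ih =>
    intro p out fB hk hfa hfb
    by_cases hp : (cs.length : Int) ≤ p
    · rw [pvA_go, if_pos hp]
      cases fB with
      | zero => simp [pvB_loop]
      | succ fB' => rw [pvB_loop, if_neg (by omega)]; simp
    · have hk' : ks ≠ [] := hk.resolve_right hp
      have hkl : 1 ≤ ks.length := List.length_pos_iff.mpr hk'
      have hp' : p < (cs.length : Int) := by omega
      obtain ⟨fB', rfl⟩ : ∃ fB'', fB = fB'' + 1 := ⟨fB - 1, by omega⟩
      rw [pvA_go, if_neg hp, if_neg (by omega)]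
      by_cases hshort : (cs.length : Int) - p < (ks.length : Int)
      · rw [if_pos hshort, pvB_tail cs ks (fB' + 1) p out (by omega) hshort]
      · rw [if_neg hshort, pvB_loop, if_pos hp', if_neg hshort]
        simp only []
        cases hmis : pvA_mismatch cs ks p 0 with
        | some j =>
          obtain ⟨hj, _⟩ := pvA_mismatch_lt cs ks p 0 j hmis
          have hm : pvB_match cs ks p 0 = j := by rw [pvMatch_eq cs ks p 0 (by omega), hmis]; rfl
          rw [hm, if_neg (by omega)]
          dsimp only
          by_cases hj0 : j = 0
          · subst hj0
            rw [if_pos rfl,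
              ih (p + ((max 0 1 : Nat) : Int)) (out ++ pvChar cs p) fB' (Or.inl hk') (by simp; omega) (by simp; omega)]
            simp [List.append_assoc]
          · rw [if_neg hj0]
            have hmax : (max j 1) = j := by omega
            rw [hmax,
              ih (p + (j : Int)) (out ++ pvChar cs p) fB' (Or.inl hk') (by omega) (by omega)]
            simp [List.append_assoc]
        | none =>
          have hm : pvB_match cs ks p 0 = ks.length := by rw [pvMatch_eq cs ks p 0 (by omega), hmis]; rfl
          rw [hm, if_pos rfl]
          dsimp only
          exact ih (p + (ks.length : Int)) out fB' (Or.inl hk') (by omega) (by omega)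

-- ===== VERDICT (by name: the statement is the Claim_ definition above) =====
theorem skip_embedded_string_2_spec : Claim_equal_skip_embedded_string_2 := by
  intro string skip start_index _ hpre
  unfold Spec_skip_embedded_string_2 skip_embedded_string_2 skip_embedded_string_2_alt
  congr 1
  have hk : skip.toList ≠ [] ∨ (string.toList.length : Int) ≤ start_index := by
    rcases hpre with h | ⟨h, _⟩
    · exact Or.inr h
    · exact Or.inl (fun hnil => h (String.toList_eq_nil_iff.mp hnil))
  rw [pvMain string.toList skip.toList (((string.toList.length : Int) - start_index).toNat + 1)
      start_index [] (((string.toList.length : Int) - start_index).toNat) hk (by omega) le_rfl]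
  simp
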